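-- pv_equiv track=rewrite | github.com/povijarrro/workspacepython | adventofcode/adventofcode2023/day07_23.py | jokerValue
-- ===== SOURCE A (Python) =====
-- from collections import Counter
--
-- d=dict()
--
-- def trn(card:str)->str:
--     return card.translate("23456789TJQKA".maketrans(d))
--
-- def jokerValue(hand:str)->str:
--     c =Counter(hand.replace("J",""))
--     if c.most_common()==[] or not "J" in hand : return "A"
--     m="2"
--     most=c.most_common()[0][1]
--     for s,count in c.most_common():
--         if (count<most):break
--         if(trn(s)>m):
--             m=s
--     return m
-- ===== SOURCE B (Python) =====
-- from collections import Counter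
--
-- d = dict()
--
-- def trn(card: str) -> str:
--     return card.translate("23456789TJQKA".maketrans(d))
--
-- def jokerValue(hand: str) -> str:
--     c = Counter(hand.replace("J", ""))
--     if not c or "J" not in hand:
--         return "A"
--     return max(c, key=lambda s: (c[s], trn(s)))
-- ===== Notes on version B (the rewrite author's own statement) =====
-- stated objective: simpler
-- what changed: B replaces A's two-phase mode selection (sort items by count descending, then a break-on-tie loop tracking a running max char seeded with '2') by a single max over the Counter with the composite key (count, card), removing the sort and the explicit loop.
-- intended difference: On hands that contain 'J' and whose most frequent non-J characters are all below '2' (space, punctuation, digits 0-1), A returns its leftover loop seed '2' -- a character not in the hand -- while B returns the highest such most-frequent character, the intended mode. — e.g. on jokerValue("J!"): A returns "2", B returns "!"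
import Mathlib
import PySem

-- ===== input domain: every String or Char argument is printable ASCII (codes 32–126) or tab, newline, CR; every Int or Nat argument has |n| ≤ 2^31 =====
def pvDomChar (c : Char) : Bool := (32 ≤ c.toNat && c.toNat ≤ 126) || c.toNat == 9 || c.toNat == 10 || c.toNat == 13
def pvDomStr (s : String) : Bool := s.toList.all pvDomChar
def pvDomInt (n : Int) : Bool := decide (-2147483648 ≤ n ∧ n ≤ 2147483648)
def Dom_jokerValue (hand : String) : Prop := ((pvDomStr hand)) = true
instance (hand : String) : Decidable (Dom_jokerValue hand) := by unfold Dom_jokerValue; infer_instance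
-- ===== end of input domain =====

-- B selects the replacement card in one composite-key max over the Counter instead of A's
-- sort-by-count-then-break-loop; objective: simpler.  Intended difference (see D_ below): on
-- hands whose most frequent non-J cards are all below '2', A returns its loop seed '2', B the
-- actual most-frequent card.

-- ===== PORT A =====
-- trn translates through str.maketrans({}) of an empty dict: the empty table maps every
-- character to itself, so trn is the identity (ported by hand; exact).
def trnA (card : Char) : Char := card

-- the 'for s,count in c.most_common(): if count<most: break; if trn(s)>m: m=s' loop
def jokerLoopA : List (Char × Int) → Int → Char → Char
  | [], _, m => m
  | (s, count) :: rest, most, m =>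
    if count < most then m
    else jokerLoopA rest most (if trnA s > m then s else m)

def jokerValue (hand : String) : String :=
  let c := PySem.Dict.counter (PySem.Str.replace hand "J" "").toList
  -- c.most_common() = sorted(c.items(), key=count, reverse=True) (stable; exact)
  let mc := PySem.List.sorted c.items (fun p => p.2) true
  if mc = [] ∨ ¬ (PySem.Str.isIn "J" hand) then "A"
  else
    let most := (mc.headD ('A', 0)).2  -- c.most_common()[0][1]; the guard ensures mc ≠ []
    String.ofList [jokerLoopA mc most '2']

-- ===== PORT B =====
-- Python's max picks a new candidate iff its key (c[s], trn(s)) is lexicographically greater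
def jokerBetter (c : PySem.Dict Char Int) (s best : Char) : Bool :=
  c.getD s 0 > c.getD best 0 || (c.getD s 0 == c.getD best 0 && trnA s > trnA best)

def jokerValue_alt (hand : String) : String :=
  let c := PySem.Dict.counter (PySem.Str.replace hand "J" "").toList
  if c.items = [] ∨ ¬ (PySem.Str.isIn "J" hand) then "A"
  else
    -- max(c, key=lambda s: (c[s], trn(s))): iterate the keys in insertion order, first maximum wins
    match c.keys with
    | [] => "A"  -- unreachable: the guard ensures the counter is nonempty
    | k :: ks => String.ofList [ks.foldl (fun best s => if jokerBetter c s best then s else best) k]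

-- ===== PRECONDITION & SPEC =====
-- On hands that contain 'J' and whose most frequent non-J characters are all below '2' (space,
-- punctuation, digits 0-1), A returns its leftover loop seed '2' — a character not in the hand —
-- while B returns the highest such most-frequent character, the intended mode.
def D_jokerValue (hand : String) : Prop :=
  let r := hand.toList.filter (fun ch => ch ≠ 'J')
  hand.toList.contains 'J' = true ∧ r ≠ [] ∧
    r.all (fun ch => !r.all (fun y => decide (r.count y ≤ r.count ch)) || decide (ch < '2')) = true
instance (hand : String) : Decidable (D_jokerValue hand) := by unfold D_jokerValue; infer_instance

def Spec_jokerValue (hand : String) (out : String) : Prop := ¬ D_jokerValue hand → out = jokerValue_alt hand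
instance (hand : String) (out : String) : Decidable (Spec_jokerValue hand out) := by unfold Spec_jokerValue; infer_instance

def pvDiffWitness_jokerValue : String := "J!"
def pvDiffWitnessOut_jokerValue : String × String := ("2", "!")

-- ===== CLAIM (what is proved, stated in full; the proofs are below) =====
def Claim_unchanged_jokerValue : Prop := ∀ (hand : String), Dom_jokerValue hand → Spec_jokerValue hand (jokerValue hand)
def Claim_changed_jokerValue : Prop := Dom_jokerValue (pvDiffWitness_jokerValue) ∧ D_jokerValue (pvDiffWitness_jokerValue) ∧ jokerValue (pvDiffWitness_jokerValue) = pvDiffWitnessOut_jokerValue.1 ∧ jokerValue_alt (pvDiffWitness_jokerValue) = pvDiffWitnessOut_jokerValue.2 ∧ pvDiffWitnessOut_jokerValue.1 ≠ pvDiffWitnessOut_jokerValue.2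
def Claim_exact_jokerValue : Prop := ∀ (hand : String), Dom_jokerValue hand → D_jokerValue hand → jokerValue hand ≠ jokerValue_alt hand

-- ===== LEMMAS AND PROOFS =====

lemma replace_go_J (fuel : Nat) (l acc : List Char) (h : l.length ≤ fuel) :
    PySem.Chars.replace.go ['J'] [] fuel l acc = acc.reverse ++ l.filter (fun c => c ≠ 'J') := by
  induction fuel generalizing l acc with
  | zero => simp at h; simp [PySem.Chars.replace.go, h]
  | succ n ih =>
    cases l with
    | nil => simp [PySem.Chars.replace.go]
    | cons c t =>
      simp only [PySem.Chars.replace.go]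
      by_cases hc : c = 'J'
      · subst hc
        rw [if_pos (by simp [List.isPrefixOf])]
        rw [ih _ _ (by simpa using Nat.le_of_succ_le_succ (by simpa using h))]
        simp
      · rw [if_neg (by simp [List.isPrefixOf]; exact fun e => hc e.symm)]
        rw [ih t (c :: acc) (by simpa using h)]
        simp [hc]

lemma replace_J (l : List Char) :
    PySem.Chars.replace l ['J'] [] = l.filter (fun c => c ≠ 'J') := by
  rw [PySem.Chars.replace]
  rw [if_neg (by simp)]
  exact replace_go_J l.length l [] (le_refl _)

lemma ifgt_eq_max (s m : Char) : (if trnA s > m then s else m) = max m s := by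
  simp only [trnA]
  rcases le_or_gt s m with h | h
  · rw [if_neg (not_lt.mpr h), max_eq_left h]
  · rw [if_pos h, max_eq_right h.le]

lemma jokerLoopA_eq (l : List (Char × Int)) (most : Int) (m : Char)
    (hp : l.Pairwise (fun a b => b.2 ≤ a.2)) :
    jokerLoopA l most m = (l.filter (fun p => ¬ p.2 < most)).foldl (fun m p => max m p.1) m := by
  induction l generalizing m with
  | nil => simp [jokerLoopA]
  | cons p t ih =>
    obtain ⟨s, count⟩ := p
    rw [List.pairwise_cons] at hp
    by_cases hlt : count < most
    · have hnil : t.filter (fun p => decide (¬ p.2 < most)) = [] := by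
        rw [List.filter_eq_nil_iff]
        intro q hq
        simpa using lt_of_le_of_lt (hp.1 q hq) hlt
      simp only [jokerLoopA, if_pos hlt, List.filter_cons]
      simp only [decide_not]
      rw [if_neg (by simpa using hlt)]
      simp only [decide_not] at hnil
      rw [hnil]
      rfl
    · simp only [jokerLoopA, if_neg hlt, ifgt_eq_max, List.filter_cons]
      rw [if_pos (by simpa using hlt)]
      rw [ih _ hp.2]
      simp

lemma foldl_max_mem (l : List Char) (m : Char) : l.foldl max m = m ∨ l.foldl max m ∈ l := by
  induction l generalizing m with
  | nil => simp
  | cons a t ih =>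
    simp only [List.foldl_cons]
    rcases ih (max m a) with h | h
    · rcases max_cases m a with ⟨he, _⟩ | ⟨he, _⟩
      · left; rw [h, he]
      · right; rw [h, he]; exact List.mem_cons_self
    · right; exact List.mem_cons_of_mem _ h

lemma le_foldl_max' (l : List Char) (m : Char) :
    m ≤ l.foldl max m ∧ ∀ y ∈ l, y ≤ l.foldl max m := by
  induction l generalizing m with
  | nil => simp
  | cons a t ih =>
    obtain ⟨h1, h2⟩ := ih (max m a)
    simp only [List.foldl_cons]
    refine ⟨le_trans (le_max_left m a) h1, ?_⟩
    intro y hy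
    rcases List.mem_cons.mp hy with rfl | hy
    · exact le_trans (le_max_right m y) h1
    · exact h2 y hy

lemma foldl_max_of_le (l : List Char) (m : Char) (h : ∀ y ∈ l, y ≤ m) : l.foldl max m = m := by
  induction l with
  | nil => rfl
  | cons a t ih =>
    have hm : max m a = m := max_eq_left (h a List.mem_cons_self)
    simp only [List.foldl_cons, hm]
    exact ih (fun y hy => h y (List.mem_cons_of_mem _ hy))

def lexle (c : PySem.Dict Char Int) (y z : Char) : Prop :=
  c.getD y 0 < c.getD z 0 ∨ (c.getD y 0 = c.getD z 0 ∧ y ≤ z)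

lemma lexle_refl (c : PySem.Dict Char Int) (y : Char) : lexle c y y := Or.inr ⟨rfl, le_refl y⟩

lemma lexle_trans (c : PySem.Dict Char Int) {x y z : Char}
    (h1 : lexle c x y) (h2 : lexle c y z) : lexle c x z := by
  rcases h1 with h1 | ⟨h1, h1'⟩ <;> rcases h2 with h2 | ⟨h2, h2'⟩
  · exact Or.inl (lt_trans h1 h2)
  · exact Or.inl (h2 ▸ h1)
  · exact Or.inl (h1 ▸ h2)
  · exact Or.inr ⟨h1.trans h2, h1'.trans h2'⟩

lemma jokerBetter_lexle (c : PySem.Dict Char Int) (s b : Char) :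
    (jokerBetter c s b = true → lexle c b s) ∧ (jokerBetter c s b = false → lexle c s b) := by
  constructor
  · intro h
    simp only [jokerBetter, trnA, Bool.or_eq_true, Bool.and_eq_true, decide_eq_true_eq, beq_iff_eq] at h
    rcases h with h | ⟨h1, h2⟩
    · exact Or.inl h
    · exact Or.inr ⟨h1.symm, h2.le⟩
  · intro h
    simp only [jokerBetter, trnA, Bool.or_eq_false_iff, Bool.and_eq_false_iff] at h
    obtain ⟨h1, h2⟩ := h
    have h1' : c.getD s 0 ≤ c.getD b 0 := by simpa using h1
    rcases lt_or_eq_of_le h1' with hlt | heq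
    · exact Or.inl hlt
    · refine Or.inr ⟨heq, ?_⟩
      rcases h2 with h2 | h2
      · exact absurd heq (by simpa using h2)
      · simpa using h2

lemma foldB_spec (c : PySem.Dict Char Int) (l : List Char) (b : Char) :
    (l.foldl (fun best s => if jokerBetter c s best then s else best) b ∈ b :: l) ∧
    ∀ y ∈ b :: l, lexle c y (l.foldl (fun best s => if jokerBetter c s best then s else best) b) := by
  induction l generalizing b with
  | nil => simpa using lexle_refl c b
  | cons a t ih =>
    simp only [List.foldl_cons]
    set b' := if jokerBetter c a b then a else b with hb'
    obtain ⟨hmem, hdom⟩ := ih b'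
    have hb'mem : b' = a ∨ b' = b := by
      by_cases hj : jokerBetter c a b <;> simp [hb', hj]
    have hlb : lexle c b b' ∧ lexle c a b' := by
      by_cases hj : jokerBetter c a b
      · simp only [hb', if_pos hj]
        exact ⟨(jokerBetter_lexle c a b).1 hj, lexle_refl c a⟩
      · simp only [hb', if_neg hj]
        exact ⟨lexle_refl c b, (jokerBetter_lexle c a b).2 (by simpa using hj)⟩
    constructor
    · rcases List.mem_cons.mp hmem with h | h
      · rcases hb'mem with h' | h'
        · rw [h, h']; exact List.mem_cons_of_mem _ List.mem_cons_self
        · rw [h, h']; exact List.mem_cons_self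
      · exact List.mem_cons_of_mem _ (List.mem_cons_of_mem _ h)
    · intro y hy
      have hfin : lexle c b' (t.foldl (fun best s => if jokerBetter c s best then s else best) b') :=
        hdom b' List.mem_cons_self
      rcases List.mem_cons.mp hy with rfl | hy
      · exact lexle_trans c hlb.1 hfin
      · rcases List.mem_cons.mp hy with rfl | hy
        · exact lexle_trans c hlb.2 hfin
        · exact hdom y (List.mem_cons_of_mem _ hy)

-- ===== new material =====
def csOf (hand : String) : List Char := hand.toList.filter (fun ch => ch ≠ 'J')
def TOf (hand : String) : List Char :=
  (PySem.Set.ofList (csOf hand)).filter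
    (fun k => decide (∀ y ∈ csOf hand, (csOf hand).count y ≤ (csOf hand).count k))

lemma cs_toList (hand : String) : (PySem.Str.replace hand "J" "").toList = csOf hand := by
  simp [csOf, replace_J]

lemma isIn_J (hand : String) : PySem.Str.isIn "J" hand = true ↔ 'J' ∈ hand.toList := by
  rw [PySem.Str.isIn_iff_infix]
  exact List.singleton_infix_iff 'J' hand.toList

lemma keys_of_cs (hand : String) :
    (PySem.Dict.counter (csOf hand)).keys = PySem.Set.ofList (csOf hand) :=
  PySem.Dict.keys_counter _

lemma mem_keys_iff (hand : String) (k : Char) :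
    k ∈ PySem.Set.ofList (csOf hand) ↔ k ∈ csOf hand := PySem.Set.mem_ofList _ _

lemma guard_A (hand : String) (h : ¬ 'J' ∈ hand.toList ∨ csOf hand = []) :
    jokerValue hand = "A" ∧ jokerValue_alt hand = "A" := by
  have hitems : (PySem.Dict.counter (csOf hand)).items
      = (PySem.Set.ofList (csOf hand)).map (fun k => (k, ((csOf hand).count k : Int))) :=
    PySem.Dict.items_counter _
  simp only [jokerValue, jokerValue_alt, cs_toList]
  rcases h with h | h
  · have hin : PySem.Str.isIn "J" hand = false := by
      cases hb : PySem.Str.isIn "J" hand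
      · rfl
      · exact absurd ((isIn_J hand).mp hb) h
    rw [if_pos (Or.inr (by rw [hin]; simp)), if_pos (Or.inr (by rw [hin]; simp))]
    exact ⟨rfl, rfl⟩
  · have hempty : (PySem.Dict.counter (csOf hand)).items = [] := by
      rw [hitems, h]; rfl
    rw [if_pos (Or.inl (by rw [PySem.List.sorted_eq_nil_iff]; exact hempty)),
        if_pos (Or.inl hempty)]
    exact ⟨rfl, rfl⟩

lemma items_ne (hand : String) (hne : csOf hand ≠ []) :
    (PySem.Dict.counter (csOf hand)).items ≠ [] := by
  obtain ⟨x, hx⟩ := List.exists_mem_of_ne_nil _ hne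
  have hxk : x ∈ PySem.Set.ofList (csOf hand) := (PySem.Set.mem_ofList _ _).mpr hx
  rw [PySem.Dict.items_counter]
  intro h0
  rw [List.map_eq_nil_iff] at h0
  rw [h0] at hxk
  exact absurd hxk (List.not_mem_nil)

lemma filter_keys_eq_T (hand : String) (most : Int)
    (hub : ∀ k ∈ PySem.Set.ofList (csOf hand), ((csOf hand).count k : Int) ≤ most)
    (hach : ∃ kp ∈ PySem.Set.ofList (csOf hand), ((csOf hand).count kp : Int) = most) :
    (PySem.Set.ofList (csOf hand)).filter
        ((fun q : Char × Int => !decide (q.2 < most)) ∘ (fun k => (k, ((csOf hand).count k : Int))))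
      = TOf hand := by
  apply List.filter_congr
  intro k hk
  simp only [Function.comp, ← decide_not, decide_eq_decide, not_lt]
  constructor
  · intro hnl y hy
    have hyk : y ∈ PySem.Set.ofList (csOf hand) := (mem_keys_iff hand y).mpr hy
    have h2 : ((csOf hand).count y : Int) ≤ ((csOf hand).count k : Int) := le_trans (hub y hyk) hnl
    exact_mod_cast h2
  · intro hall
    obtain ⟨kp, hkp, hkpe⟩ := hach
    have h3 := hall kp ((mem_keys_iff hand kp).mp hkp)
    rw [← hkpe]
    exact_mod_cast h3

lemma A_val (hand : String) (hJ : 'J' ∈ hand.toList) (hne : csOf hand ≠ []) :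
    jokerValue hand = String.ofList [(TOf hand).foldl max '2'] := by
  have hitems : (PySem.Dict.counter (csOf hand)).items
      = (PySem.Set.ofList (csOf hand)).map (fun k => (k, ((csOf hand).count k : Int))) :=
    PySem.Dict.items_counter _
  have hmcne : PySem.List.sorted (PySem.Dict.counter (csOf hand)).items (fun p => p.2) true ≠ [] := by
    rw [Ne, PySem.List.sorted_eq_nil_iff]; exact items_ne hand hne
  obtain ⟨p, tl, hpt⟩ := List.exists_cons_of_ne_nil hmcne
  simp only [jokerValue, cs_toList]
  have hin : PySem.Str.isIn "J" hand = true := (isIn_J hand).mpr hJ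
  rw [if_neg (by rw [not_or]; exact ⟨hmcne, by rw [hin]; simp⟩)]
  rw [hpt]
  simp only [List.headD_cons]
  -- the loop
  have hpw : (p :: tl).Pairwise (fun a b => b.2 ≤ a.2) := by
    have := PySem.List.sorted_pairwise_rev (PySem.Dict.counter (csOf hand)).items (fun p => p.2)
    rwa [hpt] at this
  rw [jokerLoopA_eq _ _ _ hpw]
  -- permute the filtered list back to items
  have hperm : ((p :: tl).filter (fun q => !decide (q.2 < p.2))).Perm
      ((PySem.Dict.counter (csOf hand)).items.filter (fun q => !decide (q.2 < p.2))) := by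
    have := PySem.List.sorted_perm (PySem.Dict.counter (csOf hand)).items (fun p => p.2) true
    rw [hpt] at this
    exact this.filter _
  have hrc : RightCommutative (fun (m : Char) (q : Char × Int) => max m q.1) :=
    ⟨fun a b c => by simp [max_right_comm]⟩
  have hfold := hperm.foldl_eq (f := fun (m : Char) (q : Char × Int) => max m q.1) '2'
  simp only [decide_not] at hfold ⊢
  rw [hfold]
  -- rewrite items as a map over the key set and push filter/foldl through the map
  have hub : ∀ k ∈ PySem.Set.ofList (csOf hand), ((csOf hand).count k : Int) ≤ p.2 := by
    intro k hk
    have : (k, ((csOf hand).count k : Int)) ∈ (PySem.Dict.counter (csOf hand)).items := by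
      rw [hitems]; exact List.mem_map_of_mem hk
    exact PySem.List.key_head_sorted_rev_ge _ (fun q => q.2) hpt _ this
  have hach : ∃ kp ∈ PySem.Set.ofList (csOf hand), ((csOf hand).count kp : Int) = p.2 := by
    have hp : p ∈ (PySem.Dict.counter (csOf hand)).items := by
      have : p ∈ PySem.List.sorted (PySem.Dict.counter (csOf hand)).items (fun p => p.2) true := by
        rw [hpt]; exact List.mem_cons_self
      exact (PySem.List.mem_sorted _ _ _ _).mp this
    rw [hitems] at hp
    obtain ⟨kp, hkp, hkpe⟩ := List.mem_map.mp hp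
    exact ⟨kp, hkp, by rw [← hkpe]⟩
  rw [hitems, List.filter_map, List.foldl_map]
  rw [filter_keys_eq_T hand p.2 hub hach]

lemma B_val (hand : String) (hJ : 'J' ∈ hand.toList) (hne : csOf hand ≠ []) :
    ∃ r2 : Char, jokerValue_alt hand = String.ofList [r2] ∧ r2 ∈ TOf hand ∧ ∀ y ∈ TOf hand, y ≤ r2 := by
  have hkeysne : (PySem.Dict.counter (csOf hand)).keys ≠ [] := by
    rw [keys_of_cs]
    obtain ⟨x, hx⟩ := List.exists_mem_of_ne_nil _ hne
    have hxk : x ∈ PySem.Set.ofList (csOf hand) := (PySem.Set.mem_ofList _ _).mpr hx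
    intro h0; rw [h0] at hxk; exact absurd hxk List.not_mem_nil
  obtain ⟨k0, ks, hk⟩ := List.exists_cons_of_ne_nil hkeysne
  have hin : PySem.Str.isIn "J" hand = true := (isIn_J hand).mpr hJ
  simp only [jokerValue_alt, cs_toList]
  rw [if_neg (by rw [not_or]; exact ⟨items_ne hand hne, by rw [hin]; simp⟩)]
  rw [hk]
  refine ⟨ks.foldl (fun best s => if jokerBetter (PySem.Dict.counter (csOf hand)) s best then s else best) k0, rfl, ?_, ?_⟩
  all_goals {
    have hspec := foldB_spec (PySem.Dict.counter (csOf hand)) ks k0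
    rw [← hk, keys_of_cs] at hspec
    obtain ⟨hmem, hdom⟩ := hspec
    have hcnt : ∀ y : Char, (PySem.Dict.counter (csOf hand)).getD y 0 = ((csOf hand).count y : Int) :=
      fun y => PySem.Dict.getD_counter _ _
    set r2 := ks.foldl (fun best s => if jokerBetter (PySem.Dict.counter (csOf hand)) s best then s else best) k0 with hr2
    have hub2 : ∀ y ∈ PySem.Set.ofList (csOf hand),
        ((csOf hand).count y : Int) ≤ ((csOf hand).count r2 : Int) := by
      intro y hy
      rcases hdom y hy with h | ⟨h, _⟩
      · rw [hcnt, hcnt] at h; exact le_of_lt h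
      · rw [hcnt, hcnt] at h; exact le_of_eq h
    have hr2T : r2 ∈ TOf hand := by
      rw [TOf, List.mem_filter]
      refine ⟨hmem, ?_⟩
      rw [decide_eq_true_eq]
      intro y hy
      exact_mod_cast hub2 y ((mem_keys_iff hand y).mpr hy)
    first
    | exact hr2T
    | { intro y hy
        rw [TOf, List.mem_filter, decide_eq_true_eq] at hy
        obtain ⟨hyk, hymax⟩ := hy
        rcases hdom y hyk with h | ⟨_, h⟩
        · exfalso
          rw [hcnt, hcnt] at h
          have : (csOf hand).count r2 ≤ (csOf hand).count y :=
            hymax r2 ((mem_keys_iff hand r2).mp hmem)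
          omega
        · exact h }
  }

lemma main_eq (hand : String) (hD : ¬ ('J' ∈ hand.toList ∧ csOf hand ≠ [] ∧
      ∀ ch ∈ csOf hand, (∀ y ∈ csOf hand, (csOf hand).count y ≤ (csOf hand).count ch) → ch < '2')) :
    jokerValue hand = jokerValue_alt hand := by
  by_cases hJ : 'J' ∈ hand.toList
  · by_cases hne : csOf hand = []
    · obtain ⟨h1, h2⟩ := guard_A hand (Or.inr hne); rw [h1, h2]
    · -- the interesting case
      push Not at hD
      obtain ⟨ch, hch, hchmax, hch2⟩ := hD hJ hne
      have hchT : ch ∈ TOf hand := by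
        rw [TOf, List.mem_filter, decide_eq_true_eq]
        exact ⟨(mem_keys_iff hand ch).mpr hch, hchmax⟩
      obtain ⟨r2, hB, hr2T, hr2dom⟩ := B_val hand hJ hne
      rw [A_val hand hJ hne, hB]
      have hA := foldl_max_mem (TOf hand) '2'
      obtain ⟨h2le, hAdom⟩ := le_foldl_max' (TOf hand) '2'
      set r1 := (TOf hand).foldl max '2' with hr1
      have hr1T : r1 ∈ TOf hand := by
        rcases hA with h | h
        · have h1 : ch ≤ r1 := hAdom ch hchT
          have h2 : r1 ≤ ch := by rw [h]; exact hch2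
          exact (le_antisymm h1 h2) ▸ hchT
        · exact h
      have e1 : r1 ≤ r2 := hr2dom r1 hr1T
      have e2 : r2 ≤ r1 := hAdom r2 hr2T
      rw [le_antisymm e1 e2]
  · obtain ⟨h1, h2⟩ := guard_A hand (Or.inl hJ); rw [h1, h2]

lemma main_ne (hand : String) (hD : 'J' ∈ hand.toList ∧ csOf hand ≠ [] ∧
      ∀ ch ∈ csOf hand, (∀ y ∈ csOf hand, (csOf hand).count y ≤ (csOf hand).count ch) → ch < '2') :
    jokerValue hand ≠ jokerValue_alt hand := by
  obtain ⟨hJ, hne, hall⟩ := hD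
  have hallT : ∀ chT ∈ TOf hand, chT < '2' := by
    intro chT hchT
    rw [TOf, List.mem_filter, decide_eq_true_eq] at hchT
    exact hall chT ((mem_keys_iff hand chT).mp hchT.1) hchT.2
  obtain ⟨r2, hB, hr2T, _⟩ := B_val hand hJ hne
  rw [A_val hand hJ hne, hB]
  have h1 : (TOf hand).foldl max '2' = '2' :=
    foldl_max_of_le _ _ (fun y hy => le_of_lt (hallT y hy))
  rw [h1]
  intro he
  have : '2' = r2 := by simpa using congrArg String.toList he
  exact absurd (hallT r2 hr2T) (by rw [← this]; simp)

-- ===== VERDICT (by name: the statement is the Claim_ definition above) =====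
lemma D_iff (hand : String) : D_jokerValue hand ↔
    ('J' ∈ hand.toList ∧ csOf hand ≠ [] ∧
      ∀ ch ∈ csOf hand, (∀ y ∈ csOf hand, (csOf hand).count y ≤ (csOf hand).count ch) → ch < '2') := by
  simp only [D_jokerValue, csOf, List.contains_iff_mem, List.all_eq_true, Bool.or_eq_true,
    Bool.not_eq_eq_eq_not, Bool.not_true, List.all_eq_false, decide_eq_true_eq,
    not_le]
  constructor
  · rintro ⟨h1, h2, h3⟩
    refine ⟨h1, h2, ?_⟩
    intro ch hch hall
    rcases h3 ch hch with ⟨y, hy, hlt⟩ | h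
    · exact absurd (hall y hy) (by omega)
    · exact h
  · rintro ⟨h1, h2, h3⟩
    refine ⟨h1, h2, ?_⟩
    intro ch hch
    by_cases hall : ∀ y ∈ hand.toList.filter (fun ch => ch ≠ 'J'),
        (hand.toList.filter (fun ch => ch ≠ 'J')).count y ≤ (hand.toList.filter (fun ch => ch ≠ 'J')).count ch
    · exact Or.inr (h3 ch hch hall)
    · push Not at hall
      obtain ⟨y, hy, hlt⟩ := hall
      exact Or.inl ⟨y, hy, hlt⟩

theorem jokerValue_spec : Claim_unchanged_jokerValue := by
  intro hand _ hD
  exact main_eq hand (fun h => hD ((D_iff hand).mpr h))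

set_option maxRecDepth 16384 in
theorem jokerValue_changed : Claim_changed_jokerValue := by unfold Claim_changed_jokerValue; decide

theorem jokerValue_tight : Claim_exact_jokerValue := by
  intro hand _ hD
  exact main_ne hand ((D_iff hand).mp hD)
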